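-- pv_equiv track=rewrite | github.com/MolfarUA/CodeWars_Solutions | 6 kyu/3D Cellular Neighbourhood/s.py | get_3Dneighbourhood
-- ===== SOURCE A (Python) =====
-- def get_3Dneighbourhood(n_type, mat, coordinates, distance=1):
--     lst = []
--     O = len(mat)
--     M = len(mat[0])
--     N = len(mat[0][0])
--     kc,ic,jc = coordinates[0], coordinates[1], coordinates[2]
--
--     if (ic < 0 or jc < 0 or kc < 0 or ic > M-1 or jc > N-1 or kc > O-1):
--         return lst
--
--     if (n_type == "von_neumann"):
--         kmin = max(0, kc-distance)
--         kmax = min(O-1, kc+distance)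
--
--         for k in range(kmin, kmax+1):
--             di = distance-abs(k-kc)
--
--             imin = max(0, ic-di)
--             imax = min(M-1, ic+di)
--
--             for i in range(imin,imax+1):
--                 dj = di-abs(i-ic)
--
--                 jmin = max(0, jc-dj)
--                 jmax = min(N-1, jc+dj)
--
--                 for j in range(jmin, jmax+1):
--                     if i != ic or j != jc or k != kc:
--                         lst.append(mat[k][i][j])
--
--     elif (n_type == "moore"):
--         imin = max(ic-distance,0)
--         imax = min(ic+distance,M-1)
--         jmin = max(jc-distance,0)
--         jmax = min(jc+distance,N-1)
--         kmin = max(kc-distance,0)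
--         kmax = min(kc+distance,O-1)
--
--         for k in range(kmin, kmax+1):
--             for i in range(imin, imax+1):
--                 for j in range(jmin, jmax+1):
--                     if i != ic or j != jc or k != kc:
--                         lst.append(mat[k][i][j])
--
--     return lst
-- ===== SOURCE B (Python) =====
-- def get_3Dneighbourhood(n_type, mat, coordinates, distance=1):
--     O, M, N = len(mat), len(mat[0]), len(mat[0][0])
--     kc, ic, jc = coordinates[0], coordinates[1], coordinates[2]
--     if kc < 0 or ic < 0 or jc < 0 or kc > O - 1 or ic > M - 1 or jc > N - 1:
--         return []
--     if n_type != "moore" and n_type != "von_neumann":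
--         return []
--     vn = n_type == "von_neumann"
--     out = []
--     for k in range(max(0, kc - distance), min(O - 1, kc + distance) + 1):
--         bi = distance - abs(k - kc) if vn else distance
--         for i in range(max(0, ic - bi), min(M - 1, ic + bi) + 1):
--             bj = bi - abs(i - ic) if vn else distance
--             lo, hi = max(0, jc - bj), min(N - 1, jc + bj)
--             row = mat[k][i]
--             if k == kc and i == ic:
--                 out += row[lo:jc] + row[jc + 1:hi + 1]
--             else:
--                 out += row[lo:hi + 1]
--     return out
-- ===== Notes on version B (the rewrite author's own statement) =====
-- stated objective: simpler
-- what changed: Replaces the two separate triple-nested per-cell loops (with a per-cell center test) by one unified double loop over planes/rows with a per-row Manhattan budget, where each row's contribution is taken as a slice (split around the center row's center cell) instead of an element-by-element conditional append.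
-- outside the precondition, e.g. on get_3Dneighbourhood('moore', [[[1], [2, 3]]], [0, 0, 0], 0): A returns [], B returns []; on get_3Dneighbourhood('x', [[[1], [2, 3]]], [0, 0, 0], 1): A returns [], B returns []
import Mathlib
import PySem

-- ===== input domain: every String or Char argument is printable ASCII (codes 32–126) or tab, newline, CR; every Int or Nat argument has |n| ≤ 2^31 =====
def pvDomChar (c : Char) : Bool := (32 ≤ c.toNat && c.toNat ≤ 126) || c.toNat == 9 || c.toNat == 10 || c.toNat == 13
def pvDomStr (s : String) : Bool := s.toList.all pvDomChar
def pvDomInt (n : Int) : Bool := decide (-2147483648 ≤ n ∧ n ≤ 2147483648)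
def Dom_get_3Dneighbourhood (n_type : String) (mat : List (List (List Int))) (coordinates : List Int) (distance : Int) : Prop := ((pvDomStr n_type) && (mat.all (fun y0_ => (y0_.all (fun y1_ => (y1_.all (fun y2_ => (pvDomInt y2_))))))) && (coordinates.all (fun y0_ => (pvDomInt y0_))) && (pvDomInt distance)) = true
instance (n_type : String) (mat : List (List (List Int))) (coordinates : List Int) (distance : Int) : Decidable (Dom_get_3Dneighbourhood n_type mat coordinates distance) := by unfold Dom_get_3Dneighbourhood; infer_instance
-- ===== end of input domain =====

-- B unifies A's two separate triple-nested per-cell loops into one double loop over rows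
-- that appends each row's contribution as a slice (split around the center); objective: simpler.


-- mat[k][i][j] (shared trivial indexing helper; exact under Pre_, where every index is in range)
def pvCell (mat : List (List (List Int))) (k i j : Int) : Int :=
  PySem.List.pyGetD (PySem.List.pyGetD (PySem.List.pyGetD mat k []) i []) j 0

-- ===== PORT A =====
def get_3Dneighbourhood (n_type : String) (mat : List (List (List Int))) (coordinates : List Int) (distance : Int) : List Int :=
  let O : Int := mat.length
  let M : Int := (PySem.List.pyGetD mat 0 []).length
  let N : Int := (PySem.List.pyGetD (PySem.List.pyGetD mat 0 []) 0 []).length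
  let kc := PySem.List.pyGetD coordinates 0 0
  let ic := PySem.List.pyGetD coordinates 1 0
  let jc := PySem.List.pyGetD coordinates 2 0
  if ic < 0 ∨ jc < 0 ∨ kc < 0 ∨ ic > M - 1 ∨ jc > N - 1 ∨ kc > O - 1 then []
  else if n_type == "von_neumann" then
    let kmin := max 0 (kc - distance)
    let kmax := min (O - 1) (kc + distance)
    (PySem.List.pyRange kmin (kmax + 1) 1).foldl (fun lst k =>
      let di := distance - |k - kc|
      let imin := max 0 (ic - di)
      let imax := min (M - 1) (ic + di)
      (PySem.List.pyRange imin (imax + 1) 1).foldl (fun lst i =>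
        let dj := di - |i - ic|
        let jmin := max 0 (jc - dj)
        let jmax := min (N - 1) (jc + dj)
        (PySem.List.pyRange jmin (jmax + 1) 1).foldl (fun lst j =>
          if i ≠ ic ∨ j ≠ jc ∨ k ≠ kc then lst ++ [pvCell mat k i j] else lst) lst) lst) []
  else if n_type == "moore" then
    let imin := max (ic - distance) 0
    let imax := min (ic + distance) (M - 1)
    let jmin := max (jc - distance) 0
    let jmax := min (jc + distance) (N - 1)
    let kmin := max (kc - distance) 0
    let kmax := min (kc + distance) (O - 1)
    (PySem.List.pyRange kmin (kmax + 1) 1).foldl (fun lst k =>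
      (PySem.List.pyRange imin (imax + 1) 1).foldl (fun lst i =>
        (PySem.List.pyRange jmin (jmax + 1) 1).foldl (fun lst j =>
          if i ≠ ic ∨ j ≠ jc ∨ k ≠ kc then lst ++ [pvCell mat k i j] else lst) lst) lst) []
  else []

-- ===== PORT B =====
def get_3Dneighbourhood_alt (n_type : String) (mat : List (List (List Int))) (coordinates : List Int) (distance : Int) : List Int :=
  let O : Int := mat.length
  let M : Int := (PySem.List.pyGetD mat 0 []).length
  let N : Int := (PySem.List.pyGetD (PySem.List.pyGetD mat 0 []) 0 []).length
  let kc := PySem.List.pyGetD coordinates 0 0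
  let ic := PySem.List.pyGetD coordinates 1 0
  let jc := PySem.List.pyGetD coordinates 2 0
  if kc < 0 ∨ ic < 0 ∨ jc < 0 ∨ kc > O - 1 ∨ ic > M - 1 ∨ jc > N - 1 then []
  else if n_type ≠ "moore" ∧ n_type ≠ "von_neumann" then []
  else
    let vn := n_type == "von_neumann"
    (PySem.List.pyRange (max 0 (kc - distance)) (min (O - 1) (kc + distance) + 1) 1).foldl (fun out k =>
      let bi := if vn then distance - |k - kc| else distance
      (PySem.List.pyRange (max 0 (ic - bi)) (min (M - 1) (ic + bi) + 1) 1).foldl (fun out i =>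
        let bj := if vn then bi - |i - ic| else distance
        let lo := max 0 (jc - bj)
        let hi := min (N - 1) (jc + bj)
        let row := PySem.List.pyGetD (PySem.List.pyGetD mat k []) i []
        if k = kc ∧ i = ic then
          out ++ PySem.List.slice row (some lo) (some jc) ++ PySem.List.slice row (some (jc + 1)) (some (hi + 1))
        else
          out ++ PySem.List.slice row (some lo) (some (hi + 1))) out) []

-- ===== PRECONDITION & SPEC =====
-- Pre_ excludes inputs on which the Python A raises: coordinate lists shorter than 3 and an empty
-- matrix or empty first plane (IndexError), and — only when the centre coordinate is in bounds,
-- i.e. when the loops can actually run — ragged (non-rectangular) matrices, on which A raises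
-- IndexError whenever the neighbourhood reaches a short plane/row; on ragged matrices whose short
-- parts are never visited (unknown n_type, zero/negative distance) A happens to return normally,
-- and B returns the same value there (see the cited examples).
def Pre_get_3Dneighbourhood (n_type : String) (mat : List (List (List Int))) (coordinates : List Int) (distance : Int) : Prop :=
  3 ≤ coordinates.length ∧ mat ≠ [] ∧ mat.headD [] ≠ [] ∧
  ((0 ≤ PySem.List.pyGetD coordinates 0 0 ∧
      PySem.List.pyGetD coordinates 0 0 ≤ (mat.length : Int) - 1 ∧
      0 ≤ PySem.List.pyGetD coordinates 1 0 ∧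
      PySem.List.pyGetD coordinates 1 0 ≤ ((mat.headD []).length : Int) - 1 ∧
      0 ≤ PySem.List.pyGetD coordinates 2 0 ∧
      PySem.List.pyGetD coordinates 2 0 ≤ (((mat.headD []).headD []).length : Int) - 1) →
    ∀ p ∈ mat, p.length = (mat.headD []).length ∧
      ∀ r ∈ p, r.length = ((mat.headD []).headD []).length)
instance (n_type : String) (mat : List (List (List Int))) (coordinates : List Int) (distance : Int) : Decidable (Pre_get_3Dneighbourhood n_type mat coordinates distance) := by unfold Pre_get_3Dneighbourhood; infer_instance

def pvWitness_get_3Dneighbourhood : String × List (List (List Int)) × List Int × Int :=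
  ("moore", [[[1, 2], [3, 4]], [[5, 6], [7, 8]]], [0, 1, 1], 1)

def Spec_get_3Dneighbourhood (n_type : String) (mat : List (List (List Int))) (coordinates : List Int) (distance : Int) (out : List Int) : Prop := out = get_3Dneighbourhood_alt n_type mat coordinates distance
instance (n_type : String) (mat : List (List (List Int))) (coordinates : List Int) (distance : Int) (out : List Int) : Decidable (Spec_get_3Dneighbourhood n_type mat coordinates distance out) := by unfold Spec_get_3Dneighbourhood; infer_instance

-- ===== CLAIM (what is proved, stated in full; the proofs are below) =====
def Claim_equal_get_3Dneighbourhood : Prop := ∀ (n_type : String) (mat : List (List (List Int))) (coordinates : List Int) (distance : Int), Dom_get_3Dneighbourhood n_type mat coordinates distance → Pre_get_3Dneighbourhood n_type mat coordinates distance → Spec_get_3Dneighbourhood n_type mat coordinates distance (get_3Dneighbourhood n_type mat coordinates distance)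


-- ===== LEMMAS AND PROOFS =====

-- a range with a bound below the length is a prefix of the range to the length
theorem pvRange_take (lo b L : Int) (h : b ≤ L) :
    PySem.List.pyRange lo b 1 = (PySem.List.pyRange lo L 1).take (b - lo).toNat := by
  rw [PySem.List.pyRange_one, PySem.List.pyRange_one, ← List.map_take, List.take_range]
  congr 2
  omega

-- 'for j in range(lo, b): out.append(row[j])' collects the slice row[lo:b]
theorem pvRowAll (row : List Int) (lo b : Int) (h0 : 0 ≤ lo) (hb : 0 ≤ b)
    (hL : b ≤ (row.length : Int)) :
    (PySem.List.pyRange lo b 1).map (fun j => PySem.List.pyGetD row j 0)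
      = PySem.List.slice row (some lo) (some b) := by
  rw [PySem.List.slice_toNat row h0 hb, pvRange_take lo b (row.length : Int) hL,
    List.map_take, PySem.List.map_pyGetD_pyRange' row 0 h0]
  congr 1
  omega

-- the same loop skipping j = jc collects the slice split around jc
theorem pvRowCenter (row : List Int) (lo jc hi : Int) (h0 : 0 ≤ lo) (h1 : lo ≤ jc)
    (h2 : jc ≤ hi) (hL : hi + 1 ≤ (row.length : Int)) :
    ((PySem.List.pyRange lo (hi + 1) 1).filter (fun j => decide (j ≠ jc))).map
        (fun j => PySem.List.pyGetD row j 0)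
      = PySem.List.slice row (some lo) (some jc)
        ++ PySem.List.slice row (some (jc + 1)) (some (hi + 1)) := by
  rw [PySem.List.pyRange_one_append lo jc (hi + 1) h1 (by omega),
    PySem.List.pyRange_one_cons (show jc < hi + 1 by omega), List.filter_append]
  have e1 : (PySem.List.pyRange lo jc 1).filter (fun j => decide (j ≠ jc))
      = PySem.List.pyRange lo jc 1 := by
    apply List.filter_eq_self.mpr
    intro j hj
    rw [PySem.List.mem_pyRange_one] at hj
    simp only [decide_eq_true_eq]
    omega
  have e2 : (jc :: PySem.List.pyRange (jc + 1) (hi + 1) 1).filter (fun j => decide (j ≠ jc))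
      = PySem.List.pyRange (jc + 1) (hi + 1) 1 := by
    rw [List.filter_cons_of_neg (by simp)]
    apply List.filter_eq_self.mpr
    intro j hj
    rw [PySem.List.mem_pyRange_one] at hj
    simp only [decide_eq_true_eq]
    omega
  rw [e1, e2, List.map_append, pvRowAll row lo jc h0 (by omega) (by omega),
    pvRowAll row (jc + 1) (hi + 1) (by omega) (by omega) hL]

-- 'if P(j): out.append(f(j))' as filter-then-map
theorem pvFoldlIte {alpha beta : Type} (P : alpha -> Prop) [DecidablePred P] (f : alpha -> beta)
    (l : List alpha) (acc : List beta) :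
    l.foldl (fun a x => if P x then a ++ [f x] else a) acc
      = acc ++ (l.filter (fun x => decide (P x))).map f := by
  induction l generalizing acc with
  | nil => simp
  | cons x xs ih =>
    by_cases h : P x
    · simp [List.filter_cons, h, ih, List.append_assoc]
    · simp [List.filter_cons, h, ih]

-- the common core: A's per-cell triple loop equals B's per-row slice loop, for either
-- neighbourhood type (vnb selects the von-Neumann budget)
theorem pvKFold (mat : List (List (List Int))) (O M N kc ic jc distance : Int) (vnb : Bool)
    (hrect : ∀ k i : Int, 0 ≤ k → k ≤ O - 1 → 0 ≤ i → i ≤ M - 1 →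
      ((PySem.List.pyGetD (PySem.List.pyGetD mat k []) i []).length : Int) = N)
    (hO : O = (mat.length : Int))
    (hic : 0 ≤ ic) (hicM : ic ≤ M - 1) (hjc : 0 ≤ jc) (hjcN : jc ≤ N - 1)
    (hkc : 0 ≤ kc) (hkcO : kc ≤ O - 1) :
    (PySem.List.pyRange (max 0 (kc - distance)) (min (O - 1) (kc + distance) + 1) 1).foldl
      (fun lst k =>
        let di := if vnb then distance - |k - kc| else distance
        (PySem.List.pyRange (max 0 (ic - di)) (min (M - 1) (ic + di) + 1) 1).foldl
          (fun lst i =>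
            let dj := if vnb then di - |i - ic| else distance
            (PySem.List.pyRange (max 0 (jc - dj)) (min (N - 1) (jc + dj) + 1) 1).foldl
              (fun lst j =>
                if i ≠ ic ∨ j ≠ jc ∨ k ≠ kc then lst ++ [pvCell mat k i j] else lst) lst) lst) []
    = (PySem.List.pyRange (max 0 (kc - distance)) (min (O - 1) (kc + distance) + 1) 1).foldl
      (fun out k =>
        let bi := if vnb then distance - |k - kc| else distance
        (PySem.List.pyRange (max 0 (ic - bi)) (min (M - 1) (ic + bi) + 1) 1).foldl
          (fun out i =>
            let bj := if vnb then bi - |i - ic| else distance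
            let lo := max 0 (jc - bj)
            let hi := min (N - 1) (jc + bj)
            let row := PySem.List.pyGetD (PySem.List.pyGetD mat k []) i []
            if k = kc ∧ i = ic then
              out ++ PySem.List.slice row (some lo) (some jc)
                ++ PySem.List.slice row (some (jc + 1)) (some (hi + 1))
            else
              out ++ PySem.List.slice row (some lo) (some (hi + 1))) out) [] := by
  apply PySem.List.foldl_congr_mem
  intro acc k hk
  rw [PySem.List.mem_pyRange_one] at hk
  have hd : 0 ≤ distance := by omega
  dsimp only
  have habsk0 : 0 ≤ |k - kc| := abs_nonneg _
  have habsk : |k - kc| ≤ distance := abs_le.mpr ⟨by omega, by omega⟩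
  have hdi0 : 0 ≤ (if vnb then distance - |k - kc| else distance) := by
    cases vnb <;> simp <;> omega
  set di := if vnb then distance - |k - kc| else distance with hdi
  apply PySem.List.foldl_congr_mem
  intro acc2 i hi
  rw [PySem.List.mem_pyRange_one] at hi
  have habsi0 : 0 ≤ |i - ic| := abs_nonneg _
  have habsi : |i - ic| ≤ di := abs_le.mpr ⟨by omega, by omega⟩
  have hdj0 : 0 ≤ (if vnb then di - |i - ic| else distance) := by
    cases vnb with
    | false => simpa using hd
    | true =>
      simp only [if_true]
      have : di = distance - |k - kc| := by rw [hdi]; simp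
      omega
  set dj := if vnb then di - |i - ic| else distance with hdj
  have hrow : ((PySem.List.pyGetD (PySem.List.pyGetD mat k []) i []).length : Int) = N :=
    hrect k i (by omega) (by omega) (by omega) (by omega)
  by_cases hc : k = kc ∧ i = ic
  · rw [if_pos hc]
    obtain ⟨rfl, rfl⟩ := hc
    have hcond : ∀ (a : List Int), ∀ j ∈ PySem.List.pyRange (max 0 (jc - dj)) (min (N - 1) (jc + dj) + 1) 1,
        (if i ≠ i ∨ j ≠ jc ∨ k ≠ k then a ++ [pvCell mat k i j] else a)
          = (if j ≠ jc then a ++ [pvCell mat k i j] else a) := by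
      intro a j _
      by_cases hj : j = jc <;> simp [hj]
    rw [PySem.List.foldl_congr_mem _ _ _ _ hcond,
      pvFoldlIte (fun j => j ≠ jc) (fun j => pvCell mat k i j)]
    simp only [pvCell]
    rw [pvRowCenter _ _ _ _ (by omega) (by omega) (by omega) (by rw [hrow]; omega),
      ← List.append_assoc]
  · rw [if_neg hc]
    have hcond : ∀ (a : List Int), ∀ j ∈ PySem.List.pyRange (max 0 (jc - dj)) (min (N - 1) (jc + dj) + 1) 1,
        (if i ≠ ic ∨ j ≠ jc ∨ k ≠ kc then a ++ [pvCell mat k i j] else a)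
          = a ++ [pvCell mat k i j] := by
      intro a j _
      rw [if_pos (by tauto)]
    rw [PySem.List.foldl_congr_mem _ _ _ _ hcond,
      PySem.List.foldl_append_singleton_eq_map (fun j => pvCell mat k i j)]
    simp only [pvCell]
    rw [pvRowAll _ _ _ (by omega) (by omega) (by rw [hrow]; omega)]

-- ===== VERDICT (by name: the statement is the Claim_ definition above) =====
theorem get_3Dneighbourhood_spec : Claim_equal_get_3Dneighbourhood := by
  intro n_type mat coordinates distance _ hpre
  obtain ⟨h3, hm, hp, hr⟩ := hpre
  unfold Spec_get_3Dneighbourhood get_3Dneighbourhood get_3Dneighbourhood_alt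
  dsimp only
  set O : Int := (mat.length : Int) with hO
  set M : Int := ((PySem.List.pyGetD mat 0 []).length : Int) with hM
  set N : Int := ((PySem.List.pyGetD (PySem.List.pyGetD mat 0 []) 0 []).length : Int) with hN
  set kc := PySem.List.pyGetD coordinates 0 0 with hkc
  set ic := PySem.List.pyGetD coordinates 1 0 with hic
  set jc := PySem.List.pyGetD coordinates 2 0 with hjc
  have hhead : PySem.List.pyGetD mat 0 [] = mat.headD [] := by
    cases mat with
    | nil => exact absurd rfl hm
    | cons p t => simp [PySem.List.pyGetD_zero_cons]
  have hhead2 : PySem.List.pyGetD (PySem.List.pyGetD mat 0 []) 0 [] = (mat.headD []).headD [] := by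
    rw [hhead]
    cases h : mat.headD [] with
    | nil => exact absurd h hp
    | cons q u => simp [PySem.List.pyGetD_zero_cons]
  have hMh : M = ((mat.headD []).length : Int) := by rw [hM, hhead]
  have hNh : N = (((mat.headD []).headD []).length : Int) := by rw [hN, hhead2]
  by_cases hg : ic < 0 ∨ jc < 0 ∨ kc < 0 ∨ ic > M - 1 ∨ jc > N - 1 ∨ kc > O - 1
  · have hgB : kc < 0 ∨ ic < 0 ∨ jc < 0 ∨ kc > O - 1 ∨ ic > M - 1 ∨ jc > N - 1 := by omega
    rw [if_pos hg, if_pos hgB]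
  · have hgB : ¬(kc < 0 ∨ ic < 0 ∨ jc < 0 ∨ kc > O - 1 ∨ ic > M - 1 ∨ jc > N - 1) := by omega
    rw [if_neg hg, if_neg hgB]
    have hg1 : 0 ≤ ic := by omega
    have hg2 : 0 ≤ jc := by omega
    have hg3 : 0 ≤ kc := by omega
    have hg4 : ic ≤ M - 1 := by omega
    have hg5 : jc ≤ N - 1 := by omega
    have hg6 : kc ≤ O - 1 := by omega
    have hrec := hr ⟨by omega, by omega, by omega, by omega, by omega, by omega⟩
    have hrect : ∀ k i : Int, 0 ≤ k → k ≤ O - 1 → 0 ≤ i → i ≤ M - 1 →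
        ((PySem.List.pyGetD (PySem.List.pyGetD mat k []) i []).length : Int) = N := by
      intro k i hk1 hk2 hi1 hi2
      have hplane : PySem.List.pyGetD mat k [] ∈ mat :=
        PySem.List.pyGetD_mem mat [] ⟨by omega, by omega⟩
      obtain ⟨hpl, hrows⟩ := hrec _ hplane
      have hplM : ((PySem.List.pyGetD mat k []).length : Int) = M := by
        rw [hM, hhead, hpl]
      have hrowmem : PySem.List.pyGetD (PySem.List.pyGetD mat k []) i [] ∈ PySem.List.pyGetD mat k [] :=
        PySem.List.pyGetD_mem _ [] ⟨by omega, by omega⟩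
      rw [hN, hhead2, hrows _ hrowmem]
    by_cases hv : n_type = "von_neumann"
    · have hbv : (n_type == "von_neumann") = true := by rw [hv]; rfl
      have hnB : ¬(n_type ≠ "moore" ∧ n_type ≠ "von_neumann") := fun h => h.2 hv
      rw [if_pos hbv, if_neg hnB]
      simp only [hbv]
      simp only [if_true]
      exact pvKFold mat O M N kc ic jc distance true hrect hO hg1 hg4 hg2 hg5 hg3 hg6
    · have hbv : (n_type == "von_neumann") = false := by simp [hv]
      have hbv' : ¬((n_type == "von_neumann") = true) := by simp [hbv]
      rw [if_neg hbv']
      by_cases hmo : n_type = "moore"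
      · have hbm : (n_type == "moore") = true := by rw [hmo]; rfl
        have hnB : ¬(n_type ≠ "moore" ∧ n_type ≠ "von_neumann") := fun h => h.1 hmo
        rw [if_pos hbm, if_neg hnB]
        simp only [hbv]
        simp only [Bool.false_eq_true, if_false]
        have e1 : max (ic - distance) 0 = max 0 (ic - distance) := max_comm _ _
        have e2 : min (ic + distance) (M - 1) = min (M - 1) (ic + distance) := min_comm _ _
        have e3 : max (jc - distance) 0 = max 0 (jc - distance) := max_comm _ _
        have e4 : min (jc + distance) (N - 1) = min (N - 1) (jc + distance) := min_comm _ _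
        have e5 : max (kc - distance) 0 = max 0 (kc - distance) := max_comm _ _
        have e6 : min (kc + distance) (O - 1) = min (O - 1) (kc + distance) := min_comm _ _
        rw [e1, e2, e3, e4, e5, e6]
        exact pvKFold mat O M N kc ic jc distance false hrect hO hg1 hg4 hg2 hg5 hg3 hg6
      · have hbm : ¬((n_type == "moore") = true) := by simp [hmo]
        rw [if_neg hbm, if_pos ⟨hmo, hv⟩]
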